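-- pv_equiv track=rewrite | github.com/codybartfast/aoc-2015-py | day18.py | parse
-- ===== SOURCE A (Python) =====
-- def parse(text):
--     lights = [0]
--     for line in text.splitlines():
--         row = 0
--         for char in line:
--             if char == "#":
--                 row |= 1
--             row <<= 1
--         lights.append(row)
--     lights.append(0)
--     return lights
-- ===== SOURCE B (Python) =====
-- def parse(text):
--     # Two-stage per line: translate the line into a binary numeral string
--     # ('#'->'1', anything else->'0'), append one '0' (the original's extra
--     # trailing shift), then parse the whole numeral in one go with int(.., 2).
--     def row(line):
--         return int("".join("1" if c == "#" else "0" for c in line) + "0", 2)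
--     return [0] + [row(line) for line in text.splitlines()] + [0]
-- ===== Notes on version B (the rewrite author's own statement) =====
-- stated objective: alternative
-- what changed: Each line's per-character OR/shift accumulator loop is replaced by a two-stage pipeline: translate the line into a binary numeral string ('#'->'1', else '0'), append a single '0' for the original's trailing shift, and parse the whole numeral at once with int(s, 2).
import Mathlib
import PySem

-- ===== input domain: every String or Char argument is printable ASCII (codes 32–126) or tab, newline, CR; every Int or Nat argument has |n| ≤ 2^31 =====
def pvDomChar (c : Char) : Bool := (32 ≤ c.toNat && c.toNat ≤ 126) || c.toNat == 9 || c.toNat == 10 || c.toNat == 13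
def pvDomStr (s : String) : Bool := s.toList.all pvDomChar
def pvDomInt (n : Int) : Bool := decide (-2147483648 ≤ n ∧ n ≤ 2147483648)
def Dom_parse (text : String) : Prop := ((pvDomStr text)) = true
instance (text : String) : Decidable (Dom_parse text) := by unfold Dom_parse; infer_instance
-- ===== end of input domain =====

-- B replaces the per-character OR/shift accumulator by a two-stage pipeline: build a binary numeral string ('#'->'1', else '0', plus a trailing '0') and parse it once (alternative decomposition, same cost).

-- ===== PORT A =====
-- literal transliteration of A: outer loop appends one row per line; inner loop ORs in a bit
-- and shifts after every character (including the last, hence the extra trailing shift).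
def rowA (line : String) : Int :=
  line.toList.foldl (fun row c =>
    (if c = '#' then PySem.Int.bor row 1 else row) <<< (1 : Nat)) (0 : Int)

def parse (text : String) : List Int :=
  ((PySem.Str.splitlines text).foldl (fun lights line => lights ++ [rowA line])
    [(0 : Int)]) ++ [0]

-- ===== PORT B =====
-- transliteration of Source B: per line, map chars to '1'/'0', append '0', then parse
-- the resulting binary numeral in one pass; int(s, 2) is ported as binVal (standard
-- base-2 numeral value of a string of '0'/'1' digits).
def binVal (cs : List Char) : Int :=
  cs.foldl (fun a c => 2 * a + (if c = '1' then 1 else 0)) 0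

def rowB (line : String) : Int :=
  binVal ((line.toList.map (fun c => if c = '#' then '1' else '0')) ++ ['0'])

def parse_alt (text : String) : List Int :=
  [(0 : Int)] ++ (PySem.Str.splitlines text).map rowB ++ [0]

-- ===== PRECONDITION & SPEC =====
def Spec_parse (text : String) (out : List Int) : Prop := out = parse_alt text
instance (text : String) (out : List Int) : Decidable (Spec_parse text out) := by unfold Spec_parse; infer_instance

-- ===== CLAIM =====
def Claim_equal_parse : Prop := ∀ (text : String), Dom_parse text → Spec_parse text (parse text)

-- ===== LEMMAS AND PROOFS =====

theorem nat_two_mul_lor_one (m : Nat) : 2 * m ||| 1 = 2 * m + 1 := by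
  have h := Nat.lor_bit false m true 0
  simp [Nat.bit] at h
  simpa [Nat.two_mul, Nat.mul_comm] using h

theorem stepA_eq (x : Int) (hx : 0 ≤ x) (c : Char) :
    (if c = '#' then PySem.Int.bor (2 * x) 1 else 2 * x) <<< (1 : Nat)
      = 2 * (2 * x + (if c = '#' then 1 else 0)) := by
  have hb : PySem.Int.bor (2 * x) 1 = 2 * x + 1 := by
    rw [PySem.Int.bor_of_nonneg (by omega) (by norm_num)]
    have h1 : (2 * x).toNat = 2 * x.toNat := by omega
    have h2 : (1 : Int).toNat = 1 := rfl
    rw [h1, h2, nat_two_mul_lor_one]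
    omega
  split_ifs <;> simp [hb, Int.shiftLeft_eq] <;> ring

-- invariant: A's accumulator is always twice B's numeral-so-far
theorem row_inv (cs : List Char) : ∀ a : Int, 0 ≤ a →
    cs.foldl (fun row c =>
        (if c = '#' then PySem.Int.bor row 1 else row) <<< (1 : Nat)) (2 * a)
      = 2 * (cs.map (fun c => if c = '#' then '1' else '0')).foldl
              (fun a c => 2 * a + (if c = '1' then 1 else 0)) a := by
  induction cs with
  | nil => intro a _; simp
  | cons c t ih =>
    intro a ha
    have hbit : (if (if c = '#' then '1' else '0') = '1' then (1:Int) else 0)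
        = (if c = '#' then 1 else 0) := by split_ifs <;> simp_all
    have ha' : 0 ≤ 2 * a + (if c = '#' then (1:Int) else 0) := by split_ifs <;> omega
    simp only [List.map_cons, List.foldl_cons, hbit]
    rw [stepA_eq a ha c, ih _ ha']

theorem rowA_eq_rowB (line : String) : rowA line = rowB line := by
  unfold rowA rowB binVal
  have h := row_inv line.toList 0 le_rfl
  simp only [mul_zero] at h
  rw [h, List.foldl_append]
  simp

-- A's outer foldl-append loop is [0] ++ map
theorem foldl_append_map (f : String → Int) :
    ∀ (l : List String) (acc : List Int),
      l.foldl (fun a s => a ++ [f s]) acc = acc ++ l.map f := by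
  intro l
  induction l with
  | nil => simp
  | cons s t ih => intro acc; simp [List.foldl_cons, ih]

-- ===== VERDICT =====
theorem parse_spec : Claim_equal_parse := by
  intro text _
  unfold Spec_parse parse parse_alt
  rw [foldl_append_map rowA]
  simp [rowA_eq_rowB]
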